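-- pv_equiv track=rewrite | github.com/wangzizhe/GateForge | gateforge/agent_modelica_semantic_candidate_failure_audit_v0_45_0.py | _last_omc_signal
-- ===== SOURCE A (Python) =====
-- from typing import Any
--
-- def _tool_result_texts(row: dict[str, Any]) -> list[str]:
--     texts: list[str] = []
--     for step in row.get("steps") or []:
--         for result in step.get("tool_results") or []:
--             text = str(result.get("result") or "")
--             if text:
--                 texts.append(text)
--     return texts
--
-- def _last_omc_signal(row: dict[str, Any]) -> str:
--     for text in reversed(_tool_result_texts(row)):
--         lower = text.lower()
--         if 'resultfile = "/workspace/' in text: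
--             return "successful_omc_evidence"
--         if 'resultfile = ""' in lower:
--             return "empty_simulation_result"
--         if "failed to build model" in lower:
--             return "simulation_build_failed"
--         if "too many equations" in lower or "over-determined" in lower:
--             return "over_determined"
--         if "too few equations" in lower or "under-determined" in lower:
--             return "under_determined"
--         if "index reduction" in lower:
--             return "index_reduction_failed"
--         if "structurally singular" in lower or "singular" in lower:
--             return "structural_singularity"
--         if "check of" in lower and "completed successfully" in lower:
--             return "check_model_only_pass"
--     return "no_omc_signal"
-- ===== SOURCE B (Python) =====
-- from typing import Any
--
--
-- def _classify(text: str):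
--     lower = text.lower()
--     if 'resultfile = "/workspace/' in text:
--         return "successful_omc_evidence"
--     if 'resultfile = ""' in lower:
--         return "empty_simulation_result"
--     if "failed to build model" in lower:
--         return "simulation_build_failed"
--     if "too many equations" in lower or "over-determined" in lower:
--         return "over_determined"
--     if "too few equations" in lower or "under-determined" in lower:
--         return "under_determined"
--     if "index reduction" in lower:
--         return "index_reduction_failed"
--     if "structurally singular" in lower or "singular" in lower:
--         return "structural_singularity"
--     if "check of" in lower and "completed successfully" in lower:
--         return "check_model_only_pass"
--     return None
--
-- def _last_omc_signal(row: dict[str, Any]) -> str: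
--     result = "no_omc_signal"
--     for step in row.get("steps") or []:
--         for tool_result in step.get("tool_results") or []:
--             text = str(tool_result.get("result") or "")
--             if text:
--                 result = _classify(text) or result
--     return result
-- ===== Notes on version B (the rewrite author's own statement) =====
-- stated objective: alternative
-- what changed: Replaces building a full text list and scanning it in reverse with early return by a single forward pass over steps/tool_results that folds an accumulator 'result = classify(text) or result' using a pure _classify helper.
import Mathlib
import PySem

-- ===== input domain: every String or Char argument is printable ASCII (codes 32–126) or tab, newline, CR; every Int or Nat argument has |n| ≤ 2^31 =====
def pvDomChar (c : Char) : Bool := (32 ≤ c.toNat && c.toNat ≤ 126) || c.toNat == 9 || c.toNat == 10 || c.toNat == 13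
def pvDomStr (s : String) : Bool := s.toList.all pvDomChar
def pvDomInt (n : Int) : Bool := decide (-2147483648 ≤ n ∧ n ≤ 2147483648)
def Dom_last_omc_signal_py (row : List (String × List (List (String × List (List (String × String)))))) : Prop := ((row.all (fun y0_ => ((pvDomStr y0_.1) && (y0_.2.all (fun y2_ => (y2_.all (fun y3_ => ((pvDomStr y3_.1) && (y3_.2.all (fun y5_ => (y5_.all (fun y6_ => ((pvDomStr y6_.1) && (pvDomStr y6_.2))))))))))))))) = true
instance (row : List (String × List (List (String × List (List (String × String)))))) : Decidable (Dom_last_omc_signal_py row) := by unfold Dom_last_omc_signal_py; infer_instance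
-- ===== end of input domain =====

-- B replaces the build-list-then-reverse-scan-with-early-return by a single forward pass
-- folding 'result = classify(text) or result' with a pure classifier helper (alternative decomposition, same cost).

-- ===== PORT A =====
-- texts = _tool_result_texts(row)
def pvToolResultTexts (row : List (String × List (List (String × List (List (String × String)))))) : List String :=
  (PySem.Dict.getD (PySem.Dict.mk row) "steps" []).foldl (fun texts step =>
    (PySem.Dict.getD (PySem.Dict.mk step) "tool_results" []).foldl (fun texts result =>
      let text := PySem.Dict.getD (PySem.Dict.mk result) "result" ""
      if text ≠ "" then texts ++ [text] else texts) texts) []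

-- the 'for text in reversed(texts): …return…' loop, scanning a list with early return
def pvScanA : List String → String
  | [] => "no_omc_signal"
  | text :: rest =>
    let lower := PySem.Str.lower text
    if PySem.Str.isIn "resultfile = \"/workspace/" text then "successful_omc_evidence"
    else if PySem.Str.isIn "resultfile = \"\"" lower then "empty_simulation_result"
    else if PySem.Str.isIn "failed to build model" lower then "simulation_build_failed"
    else if PySem.Str.isIn "too many equations" lower || PySem.Str.isIn "over-determined" lower then "over_determined"
    else if PySem.Str.isIn "too few equations" lower || PySem.Str.isIn "under-determined" lower then "under_determined"
    else if PySem.Str.isIn "index reduction" lower then "index_reduction_failed"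
    else if PySem.Str.isIn "structurally singular" lower || PySem.Str.isIn "singular" lower then "structural_singularity"
    else if PySem.Str.isIn "check of" lower && PySem.Str.isIn "completed successfully" lower then "check_model_only_pass"
    else pvScanA rest

def last_omc_signal_py (row : List (String × List (List (String × List (List (String × String)))))) : String :=
  pvScanA (pvToolResultTexts row).reverse

-- ===== PORT B =====
-- _classify(text): the 8 checks in priority order, None when nothing matches
def pvClassify (text : String) : Option String :=
  let lower := PySem.Str.lower text
  if PySem.Str.isIn "resultfile = \"/workspace/" text then some "successful_omc_evidence"
  else if PySem.Str.isIn "resultfile = \"\"" lower then some "empty_simulation_result"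
  else if PySem.Str.isIn "failed to build model" lower then some "simulation_build_failed"
  else if PySem.Str.isIn "too many equations" lower || PySem.Str.isIn "over-determined" lower then some "over_determined"
  else if PySem.Str.isIn "too few equations" lower || PySem.Str.isIn "under-determined" lower then some "under_determined"
  else if PySem.Str.isIn "index reduction" lower then some "index_reduction_failed"
  else if PySem.Str.isIn "structurally singular" lower || PySem.Str.isIn "singular" lower then some "structural_singularity"
  else if PySem.Str.isIn "check of" lower && PySem.Str.isIn "completed successfully" lower then some "check_model_only_pass"
  else none

-- forward accumulator pass: result = _classify(text) or result
def last_omc_signal_py_alt (row : List (String × List (List (String × List (List (String × String)))))) : String :=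
  (PySem.Dict.getD (PySem.Dict.mk row) "steps" []).foldl (fun result step =>
    (PySem.Dict.getD (PySem.Dict.mk step) "tool_results" []).foldl (fun result tool_result =>
      let text := PySem.Dict.getD (PySem.Dict.mk tool_result) "result" ""
      if text ≠ "" then (pvClassify text).getD result else result) result) "no_omc_signal"

-- ===== PRECONDITION & SPEC =====
def Spec_last_omc_signal_py (row : List (String × List (List (String × List (List (String × String)))))) (out : String) : Prop := out = last_omc_signal_py_alt row
instance (row : List (String × List (List (String × List (List (String × String)))))) (out : String) : Decidable (Spec_last_omc_signal_py row out) := by unfold Spec_last_omc_signal_py; infer_instance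

-- ===== CLAIM (what is proved, stated in full; the proofs are below) =====
def Claim_equal_last_omc_signal_py : Prop := ∀ (row : List (String × List (List (String × List (List (String × String)))))), Dom_last_omc_signal_py row → Spec_last_omc_signal_py row (last_omc_signal_py row)

-- ===== LEMMAS AND PROOFS =====

-- B's per-text step, named for the lemmas
def pvStep (result : String) (text : String) : String := (pvClassify text).getD result

-- A's scan head agrees with the classifier
theorem pvScanA_cons (t : String) (rest : List String) :
    pvScanA (t :: rest) = (pvClassify t).getD (pvScanA rest) := by
  simp only [pvScanA, pvClassify]
  split_ifs <;> rfl

-- A's scan is the first classified element, default "no_omc_signal"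
theorem pvScanA_eq_findSome (l : List String) :
    pvScanA l = (l.findSome? pvClassify).getD "no_omc_signal" := by
  induction l with
  | nil => rfl
  | cons t rest ih =>
    rw [pvScanA_cons, ih, List.findSome?_cons]
    cases h : pvClassify t <;> simp [Option.getD]

-- B's forward fold over a text list is A's reverse scan
theorem pvFoldl_step (l : List String) (a : String) :
    l.foldl pvStep a = (l.reverse.findSome? pvClassify).getD a := by
  induction l generalizing a with
  | nil => rfl
  | cons t rest ih =>
    rw [List.foldl_cons, ih, List.reverse_cons, List.findSome?_append]
    cases h : rest.reverse.findSome? pvClassify <;> simp [pvStep, Option.getD]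

-- folding f over a foldl-built list = folding the per-element folds (both nesting levels)
theorem pvBuildFold {α : Type} (build : α → List String → List String)
    (fold : α → String → String)
    (h : ∀ x ts a, (build x ts).foldl pvStep a = fold x (ts.foldl pvStep a)) :
    ∀ (l : List α) (ts : List String) (a : String),
      (l.foldl (fun ts x => build x ts) ts).foldl pvStep a
        = l.foldl (fun a x => fold x a) (ts.foldl pvStep a) := by
  intro l
  induction l with
  | nil => intro ts a; rfl
  | cons x rest ih =>
    intro ts a
    simp only [List.foldl_cons]
    rw [ih (build x ts) a, h x ts a]

-- main theorem body
theorem pvMain (row : List (String × List (List (String × List (List (String × String)))))) :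
    last_omc_signal_py row = last_omc_signal_py_alt row := by
  unfold last_omc_signal_py last_omc_signal_py_alt pvToolResultTexts
  rw [pvScanA_eq_findSome, ← pvFoldl_step]
  have inner : ∀ (step : List (String × List (List (String × String)))) (ts : List String) (a : String),
      ((PySem.Dict.getD (PySem.Dict.mk step) "tool_results" []).foldl (fun ts result =>
          let text := PySem.Dict.getD (PySem.Dict.mk result) "result" "";
          if text ≠ "" then ts ++ [text] else ts) ts).foldl pvStep a
        = (PySem.Dict.getD (PySem.Dict.mk step) "tool_results" []).foldl (fun a tool_result =>
          let text := PySem.Dict.getD (PySem.Dict.mk tool_result) "result" "";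
          if text ≠ "" then (pvClassify text).getD a else a) (ts.foldl pvStep a) := by
    intro step
    refine pvBuildFold _ _ ?_ (PySem.Dict.getD (PySem.Dict.mk step) "tool_results" [])
    intro r ts a
    by_cases h : PySem.Dict.getD (PySem.Dict.mk r) "result" "" ≠ "" <;>
      simp [h, List.foldl_append, pvStep]
  exact pvBuildFold _ _ inner (PySem.Dict.getD (PySem.Dict.mk row) "steps" []) [] "no_omc_signal"

-- ===== VERDICT (by name: the statement is the Claim_ definition above) =====
theorem last_omc_signal_py_spec : Claim_equal_last_omc_signal_py := by
  intro row _
  unfold Spec_last_omc_signal_py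
  exact pvMain row
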